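-- pv_equiv track=rewrite | github.com/hyeyeonismm/algorithm-study | 프로그래머스/0/120902. 문자열 계산하기/문자열 계산하기.py | solution
-- ===== SOURCE A (Python) =====
-- def solution(my_string):
--     my_string = list(map(str, my_string.split()))
--     i=1
--     answer = int(my_string[0])
--     while i<len(my_string):
--         if my_string[i]=='+':
--             answer += int(my_string[i+1])
--         else:
--             answer -= int(my_string[i+1])
--         i+=2
--
--     return answer
-- ===== SOURCE B (Python) =====
-- def solution(my_string):
--     def ev(toks):
--         if len(toks) == 1:
--             return int(toks[0])
--         if toks[-2] == '+':
--             return ev(toks[:-2]) + int(toks[-1])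
--         return ev(toks[:-2]) - int(toks[-1])
--     return ev(my_string.split())
-- ===== Notes on version B (the rewrite author's own statement) =====
-- stated objective: alternative
-- what changed: Replaces A's left-to-right index-stepping while-loop over an accumulator with right-to-left structural recursion: evaluate the prefix toks[:-2] recursively, then apply the trailing (operator, operand) pair; correct because + and - are left-associative so the whole value is (value of prefix) op (last number).
import Mathlib
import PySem

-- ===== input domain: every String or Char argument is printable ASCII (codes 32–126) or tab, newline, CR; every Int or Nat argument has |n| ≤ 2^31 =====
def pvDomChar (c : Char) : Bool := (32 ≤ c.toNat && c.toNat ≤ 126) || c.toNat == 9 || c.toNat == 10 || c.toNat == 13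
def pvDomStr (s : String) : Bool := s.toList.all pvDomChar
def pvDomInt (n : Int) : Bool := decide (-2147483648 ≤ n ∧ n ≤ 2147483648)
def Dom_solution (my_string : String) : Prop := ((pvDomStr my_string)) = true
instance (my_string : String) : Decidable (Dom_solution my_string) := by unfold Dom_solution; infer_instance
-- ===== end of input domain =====

-- B replaces A's left-to-right index loop with right-to-left recursion on the last (op, num) pair (objective: alternative).


-- int(s); the raising case (none) is excluded by Pre_solution
def pyInt (s : String) : Int := (PySem.Int.ofStr? s).getD 0

-- ===== PORT A =====
-- while i < len(ts): if ts[i]=='+': answer += int(ts[i+1]) else: answer -= int(ts[i+1]); i += 2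
def solutionGo (ts : List String) (i : Nat) (answer : Int) : Int :=
  if _h : i < ts.length then
    solutionGo ts (i + 2)
      (if PySem.List.pyGetD ts (i : Int) "" == "+"
       then answer + pyInt (PySem.List.pyGetD ts ((i : Int) + 1) "")
       else answer - pyInt (PySem.List.pyGetD ts ((i : Int) + 1) ""))
  else answer
termination_by ts.length - i

def solution (my_string : String) : Int :=
  let ts := PySem.Str.split₀ my_string
  solutionGo ts 1 (pyInt (PySem.List.pyGetD ts (0 : Int) ""))

-- ===== PORT B =====
-- def ev(toks): if len==1: int(toks[0]); elif toks[-2]=='+': ev(toks[:-2])+int(toks[-1]); else: ev(toks[:-2])-int(toks[-1])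
-- (on toks of length 0 or 2k the Python recursion hits toks[-2] of [] = IndexError; that input is
--  outside Pre_solution, and the port returns 0 there only to be total)
def evB (toks : List String) : Int :=
  if toks.length = 1 then pyInt (PySem.List.pyGetD toks (0 : Int) "")
  else if _h : toks.length < 1 then 0   -- Python raises IndexError here (outside Pre_solution)
  else if PySem.List.pyGetD toks (-2) "" == "+"
       then evB (PySem.List.slice toks none (some (-2))) + pyInt (PySem.List.pyGetD toks (-1) "")
       else evB (PySem.List.slice toks none (some (-2))) - pyInt (PySem.List.pyGetD toks (-1) "")
termination_by toks.length
decreasing_by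
  all_goals
    rw [PySem.List.slice_to_neg_ofNat toks 2 (by omega)]
    simp only [List.length_take]
    omega

def solution_alt (my_string : String) : Int :=
  evB (PySem.Str.split₀ my_string)

-- ===== PRECONDITION & SPEC =====
-- Pre_ is exactly where the Python A returns: a non-empty odd-length token list (otherwise
-- IndexError) whose even-position tokens are Python ints (otherwise ValueError).
def Pre_solution (my_string : String) : Prop :=
  (PySem.Str.split₀ my_string).length % 2 = 1 ∧
  ∀ i, i < (PySem.Str.split₀ my_string).length → i % 2 = 0 →
    (PySem.Int.ofStr? ((PySem.Str.split₀ my_string).getD i "")).isSome = true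
instance (my_string : String) : Decidable (Pre_solution my_string) := by unfold Pre_solution; infer_instance

def pvWitness_solution : String := "5"

def Spec_solution (my_string : String) (out : Int) : Prop := out = solution_alt my_string
instance (my_string : String) (out : Int) : Decidable (Spec_solution my_string out) := by unfold Spec_solution; infer_instance

-- ===== CLAIM (what is proved, stated in full; the proofs are below) =====
def Claim_equal_solution : Prop := ∀ (my_string : String), Dom_solution my_string → Pre_solution my_string → Spec_solution my_string (solution my_string)

-- ===== LEMMAS AND PROOFS =====

-- common spine: the evaluation of an alternating suffix against an accumulator
def goA : List String → Int → Int
  | op :: num :: r, a => goA r (if op == "+" then a + pyInt num else a - pyInt num)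
  | _, a => a

-- A's indexed loop equals goA on the dropped suffix
lemma solutionGo_eq_goA (ts : List String) (i : Nat) (answer : Int)
    (hi : i % 2 = 1) (hlen : ts.length % 2 = 1) :
    solutionGo ts i answer = goA (ts.drop i) answer := by
  rw [solutionGo]
  split
  · rename_i h
    have h1 : i + 1 < ts.length := by omega
    have hd : ts.drop i = ts[i] :: ts[i+1] :: ts.drop (i+2) := by
      rw [List.drop_eq_getElem_cons (by omega), List.drop_eq_getElem_cons (by omega)]
    have e0 : PySem.List.pyGetD ts (i : Int) "" = ts[i] := by
      rw [PySem.List.pyGetD_natCast, List.getD_eq_getElem _ _ h]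
    have e1 : PySem.List.pyGetD ts ((i : Int) + 1) "" = ts[i+1] := by
      have hc : ((i : Int) + 1) = ((i + 1 : Nat) : Int) := by push_cast; ring
      rw [hc, PySem.List.pyGetD_natCast, List.getD_eq_getElem _ _ h1]
    rw [hd, e0, e1, goA]
    exact solutionGo_eq_goA ts (i + 2) _ (by omega) hlen
  · rename_i h
    rw [List.drop_eq_nil_of_le (by omega)]
    rfl
termination_by ts.length - i

-- appending one (op, num) pair behind an even-length alternating list
lemma goA_append (m : List String) (op num : String) (a : Int) (hm : m.length % 2 = 0) :
    goA (m ++ [op, num]) a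
      = (if op == "+" then goA m a + pyInt num else goA m a - pyInt num) := by
  match m with
  | [] => simp [goA]
  | [x] => simp at hm
  | x :: y :: r =>
    simp only [List.cons_append, goA]
    exact goA_append r op num _ (by simp at hm; omega)
termination_by m.length

-- B's right-to-left recursion equals goA on the tail, seeded with the head
lemma evB_eq_goA (l : List String) (hodd : l.length % 2 = 1) :
    evB l = goA l.tail (pyInt (PySem.List.pyGetD l (0 : Int) "")) := by
  rw [evB]
  by_cases h1 : l.length = 1
  · match l, h1 with
    | [x], _ => simp [goA]
  · rw [if_neg h1]
    have h3 : 3 ≤ l.length := by omega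
    rw [dif_neg (by omega)]
    -- decompose l = m ++ [op, num]
    have hm : l = l.take (l.length - 2) ++ [l[l.length - 2], l[l.length - 2 + 1]'(by omega)] := by
      conv_lhs => rw [← List.take_append_drop (l.length - 2) l]
      congr 1
      rw [List.drop_eq_getElem_cons (by omega), List.drop_eq_getElem_cons (by omega),
          List.drop_eq_nil_of_le (by omega)]
    have eop : PySem.List.pyGetD l (-2) "" = l[l.length - 2] := by
      rw [PySem.List.pyGetD_neg_ofNat l 2 "" (by omega) (by omega)]
    have enum : PySem.List.pyGetD l (-1) "" = l[l.length - 2 + 1]'(by omega) := by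
      rw [PySem.List.pyGetD_neg_ofNat l 1 "" (by omega) (by omega)]
      exact getElem_congr rfl (by omega) (by omega)
    have eslice : PySem.List.slice l none (some (-2)) = l.take (l.length - 2) := by
      rw [PySem.List.slice_to_neg_ofNat l 2 (by omega)]
    have hlt : (l.take (l.length - 2)).length % 2 = 1 := by
      simp only [List.length_take]; omega
    have hne : l.take (l.length - 2) ≠ [] := by
      intro h; have := congrArg List.length h
      simp only [List.length_take, List.length_nil] at this; omega
    have ih := evB_eq_goA (l.take (l.length - 2)) hlt
    rw [eop, enum, eslice, ih]
    -- head of l is head of the prefix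
    have ehead : PySem.List.pyGetD (l.take (l.length - 2)) (0 : Int) ""
        = PySem.List.pyGetD l (0 : Int) "" := by
      simp only [PySem.List.pyGetD_zero, List.getD]
      rw [List.getElem?_take_of_lt (by omega)]
    -- tail decomposition
    have etail : l.tail = (l.take (l.length - 2)).tail
        ++ [l[l.length - 2], l[l.length - 2 + 1]'(by omega)] := by
      conv_lhs => rw [hm]
      match hh : l.take (l.length - 2), hne with
      | x :: r, _ => simp
    rw [ehead, etail,
        goA_append _ _ _ _ (by
          match hh : l.take (l.length - 2), hne with
          | x :: r, _ =>
            have := congrArg List.length hh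
            simp only [List.length_take, List.length_cons] at this
            simp only [List.tail_cons]
            omega)]
termination_by l.length
decreasing_by simp only [List.length_take]; omega

-- ===== VERDICT (by name: the statement is the Claim_ definition above) =====
theorem solution_spec : Claim_equal_solution := by
  intro s _hdom hpre
  obtain ⟨hlen, _hall⟩ := hpre
  simp only [Spec_solution, solution, solution_alt]
  rw [solutionGo_eq_goA _ 1 _ (by decide) hlen, evB_eq_goA _ hlen, List.drop_one]
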